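-- pv_equiv track=rewrite | github.com/3uyuan1ee/Fix_agent | src/tools/fix_suggestion_quality_assessor.py | _get_indentation_style
-- ===== SOURCE A (Python) =====
-- def _get_indentation_style(code: str) -> str:
--     """获取缩进风格"""
--     lines = [line for line in code.split('\n') if line.strip()]
--     if not lines:
--         return "unknown"
--
--     # 统计每行的缩进
--     indentations = []
--     for line in lines:
--         if line.startswith((' ', '\t')):
--             indentations.append(line[:len(line) - len(line.lstrip())])
--
--     if not indentations:
--         return "none"
--
--     # 判断主要缩进风格
--     if all(indent == '    ' for indent in indentations):
--         return "4_spaces"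
--     elif all(indent == '  ' for indent in indentations):
--         return "2_spaces"
--     elif all(indent == '\t' for indent in indentations):
--         return "tab"
--     else:
--         return "mixed"
-- ===== SOURCE B (Python) =====
-- def _get_indentation_style(code: str) -> str:
--     # One streaming pass: classify each line to a style label and fold the
--     # labels with an absorbing join; no intermediate list, no all() scans.
--     seen = False
--     verdict = "none"
--     for line in code.split('\n'):
--         if not line.strip():
--             continue
--         seen = True
--         if not line.startswith((' ', '\t')):
--             continue
--         indent = line[:len(line) - len(line.lstrip())]
--         if indent == '    ':
--             style = "4_spaces"
--         elif indent == '  ':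
--             style = "2_spaces"
--         elif indent == '\t':
--             style = "tab"
--         else:
--             style = "mixed"
--         if verdict == "none":
--             verdict = style
--         elif verdict != style:
--             verdict = "mixed"
--     return verdict if seen else "unknown"
-- ===== Notes on version B (the rewrite author's own statement) =====
-- stated objective: alternative
-- what changed: A stages the work (collect non-blank lines, build a list of indentation prefixes, then three separate all() scans against each candidate); B is one streaming pass that classifies each line to a style label and folds the labels with an absorbing join, keeping only a (seen, verdict) pair and no intermediate list.
import Mathlib
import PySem

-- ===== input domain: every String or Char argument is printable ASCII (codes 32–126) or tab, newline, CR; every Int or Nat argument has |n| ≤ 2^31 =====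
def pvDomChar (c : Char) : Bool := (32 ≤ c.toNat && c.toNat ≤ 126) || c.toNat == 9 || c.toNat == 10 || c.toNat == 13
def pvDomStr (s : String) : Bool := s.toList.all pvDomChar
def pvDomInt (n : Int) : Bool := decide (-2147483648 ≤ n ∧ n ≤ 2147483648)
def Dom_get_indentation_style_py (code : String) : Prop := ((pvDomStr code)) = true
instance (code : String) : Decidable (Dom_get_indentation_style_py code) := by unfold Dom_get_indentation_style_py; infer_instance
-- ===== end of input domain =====

-- B replaces A's staged passes (collect lines, build indent list, three all() scans) by ONE
-- streaming pass that labels each line and folds labels with an absorbing join (objective: alternative).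

-- ===== PORT A =====
-- helpers (transliterations of A's sub-expressions): non-blank lines, and a line's indentation prefix
def pvLines (code : String) : List (List Char) :=
  (PySem.Chars.splitOn code.toList ['\n']).filter (fun line => !(PySem.Chars.strip line).isEmpty)

def pvIndent (line : List Char) : List Char :=
  PySem.List.slice line none (some ((line.length : Int) - ((PySem.Chars.lstrip line).length : Int)))

def get_indentation_style_py (code : String) : String :=
  let lines := pvLines code
  if lines.isEmpty then "unknown"
  else
    let indentations := lines.foldl
      (fun acc line =>
        if PySem.Chars.startswith line [' '] || PySem.Chars.startswith line ['\t'] then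
          acc ++ [pvIndent line]
        else acc) []
    if indentations.isEmpty then "none"
    else if indentations.all (fun indent => indent == [' ', ' ', ' ', ' ']) then "4_spaces"
    else if indentations.all (fun indent => indent == [' ', ' ']) then "2_spaces"
    else if indentations.all (fun indent => indent == ['\t']) then "tab"
    else "mixed"

-- ===== PORT B =====
-- Source B's if/elif-chain computing the per-line style label
def pvStyle (line : List Char) : String :=
  let indent := pvIndent line
  if indent == [' ', ' ', ' ', ' '] then "4_spaces"
  else if indent == [' ', ' '] then "2_spaces"
  else if indent == ['\t'] then "tab"
  else "mixed"

-- Source B's verdict update: none→style, disagreement→mixed, else unchanged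
def pvJoin (v s : String) : String :=
  if v == "none" then s else if v != s then "mixed" else v

def get_indentation_style_py_alt (code : String) : String :=
  let st := (PySem.Chars.splitOn code.toList ['\n']).foldl
    (fun (st : Bool × String) line =>
      if (PySem.Chars.strip line).isEmpty then st
      else if !(PySem.Chars.startswith line [' '] || PySem.Chars.startswith line ['\t']) then
        (true, st.2)
      else (true, pvJoin st.2 (pvStyle line)))
    (false, "none")
  if st.1 then st.2 else "unknown"

-- ===== PRECONDITION & SPEC =====
def Spec_get_indentation_style_py (code : String) (out : String) : Prop := out = get_indentation_style_py_alt code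
instance (code : String) (out : String) : Decidable (Spec_get_indentation_style_py code out) := by unfold Spec_get_indentation_style_py; infer_instance

-- ===== CLAIM (what is proved, stated in full; the proofs are below) =====
def Claim_equal_get_indentation_style_py : Prop := ∀ (code : String), Dom_get_indentation_style_py code → Spec_get_indentation_style_py code (get_indentation_style_py code)

-- ===== LEMMAS AND PROOFS =====

-- proof-only abbreviations
def pvCond (line : List Char) : Bool :=
  PySem.Chars.startswith line [' '] || PySem.Chars.startswith line ['\t']

def pvAppendIf (acc : List (List Char)) (line : List Char) : List (List Char) :=
  if pvCond line then acc ++ [pvIndent line] else acc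

def pvG (v : String) (line : List Char) : String :=
  if pvCond line then pvJoin v (pvStyle line) else v

-- A's classification of a collected indent list
def pvClassify (es : List (List Char)) : String :=
  if es.isEmpty then "none"
  else if es.all (fun indent => indent == [' ', ' ', ' ', ' ']) then "4_spaces"
  else if es.all (fun indent => indent == [' ', ' ']) then "2_spaces"
  else if es.all (fun indent => indent == ['\t']) then "tab"
  else "mixed"

-- B's fold over the raw split lines equals a fold of pvG-like steps over the filtered lines
lemma pvFoldl_skip_filter (f : (Bool × String) → List Char → (Bool × String)) :
    ∀ (l : List (List Char)) (st : Bool × String),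
      l.foldl (fun st line => if (PySem.Chars.strip line).isEmpty then st else f st line) st
        = (l.filter (fun line => !(PySem.Chars.strip line).isEmpty)).foldl f st := by
  intro l
  induction l with
  | nil => intro st; rfl
  | cons x t ih =>
    intro st
    rw [List.foldl_cons, List.filter_cons]
    by_cases hx : (PySem.Chars.strip x).isEmpty
    · simp only [hx, if_true, Bool.not_true, Bool.false_eq_true, if_false]
      exact ih st
    · simp only [Bool.not_eq_true] at hx
      simp only [hx, Bool.not_false, if_true, Bool.false_eq_true, if_false, List.foldl_cons]
      exact ih (f st x)

-- B's per-line step always sets the seen-flag and updates the verdict by pvG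
lemma pvStep_eq :
    (fun (st : Bool × String) line =>
        if !(PySem.Chars.startswith line [' '] || PySem.Chars.startswith line ['\t']) then
          (true, st.2)
        else (true, pvJoin st.2 (pvStyle line)))
      = (fun (st : Bool × String) line => ((true : Bool), pvG st.2 line)) := by
  funext st line
  by_cases hc : pvCond line
  · have hc' := hc
    unfold pvCond at hc'
    simp [pvG, hc, hc']
  · have hc' := hc
    unfold pvCond at hc'
    simp only [Bool.not_eq_true] at hc'
    simp [pvG, hc, hc']

lemma pvFoldl_pair :
    ∀ (l : List (List Char)) (b : Bool) (v : String),
      l.foldl (fun (st : Bool × String) line => ((true : Bool), pvG st.2 line)) (b, v)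
        = (if l.isEmpty then b else true, l.foldl pvG v) := by
  intro l
  induction l with
  | nil => intro b v; rfl
  | cons x t ih => intro b v; simp [ih]

-- the one-step commutation on a raw indent value
lemma pvStep_indent (acc : List (List Char)) (d : List Char) :
    pvClassify (acc ++ [d])
      = pvJoin (pvClassify acc)
          (if d == [' ', ' ', ' ', ' '] then "4_spaces"
           else if d == [' ', ' '] then "2_spaces"
           else if d == ['\t'] then "tab" else "mixed") := by
  cases acc with
  | nil =>
    by_cases h4 : d = [' ', ' ', ' ', ' ']
    · simp [pvClassify, pvJoin, h4]
    · by_cases h2 : d = [' ', ' ']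
      · simp [pvClassify, pvJoin, h4, h2]
      · by_cases ht : d = ['\t']
        · simp [pvClassify, pvJoin, h4, h2, ht]
        · simp [pvClassify, pvJoin, h4, h2, ht]
  | cons a as =>
    by_cases h4 : ((a :: as).all fun i => i == [' ', ' ', ' ', ' ']) = true
    · have ha : a = [' ', ' ', ' ', ' '] := by
        have := (List.all_eq_true.mp h4) a (by simp)
        simpa using this
      by_cases hd4 : d = [' ', ' ', ' ', ' ']
      · simp [pvClassify, pvJoin, h4, hd4, ha] <;> split_ifs <;> simp_all <;> tauto
      · by_cases hd2 : d = [' ', ' ']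
        · simp [pvClassify, pvJoin, h4, hd4, hd2, ha] <;> split_ifs <;> simp_all <;> tauto
        · by_cases hdt : d = ['\t']
          · simp [pvClassify, pvJoin, h4, hd4, hd2, hdt, ha] <;> split_ifs <;> simp_all <;> tauto
          · simp [pvClassify, pvJoin, h4, hd4, hd2, hdt, ha] <;> split_ifs <;> simp_all <;> tauto
    · by_cases h2 : ((a :: as).all fun i => i == [' ', ' ']) = true
      · have ha : a = [' ', ' '] := by
          have := (List.all_eq_true.mp h2) a (by simp)
          simpa using this
        by_cases hd2 : d = [' ', ' ']
        · simp [pvClassify, pvJoin, h4, h2, hd2, ha] <;> split_ifs <;> simp_all <;> tauto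
        · by_cases hd4 : d = [' ', ' ', ' ', ' ']
          · simp [pvClassify, pvJoin, h4, h2, hd2, hd4, ha] <;> split_ifs <;> simp_all <;> tauto
          · by_cases hdt : d = ['\t']
            · simp [pvClassify, pvJoin, h4, h2, hd2, hd4, hdt, ha] <;> split_ifs <;> simp_all <;> tauto
            · simp [pvClassify, pvJoin, h4, h2, hd2, hd4, hdt, ha] <;> split_ifs <;> simp_all <;> tauto
      · by_cases ht : ((a :: as).all fun i => i == ['\t']) = true
        · have ha : a = ['\t'] := by
            have := (List.all_eq_true.mp ht) a (by simp)
            simpa using this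
          by_cases hdt : d = ['\t']
          · simp [pvClassify, pvJoin, h4, h2, ht, hdt, ha] <;> split_ifs <;> simp_all <;> tauto
          · by_cases hd4 : d = [' ', ' ', ' ', ' ']
            · simp [pvClassify, pvJoin, h4, h2, ht, hdt, hd4, ha] <;> split_ifs <;> simp_all <;> tauto
            · by_cases hd2 : d = [' ', ' ']
              · simp [pvClassify, pvJoin, h4, h2, ht, hdt, hd4, hd2, ha] <;> split_ifs <;> simp_all <;> tauto
              · simp [pvClassify, pvJoin, h4, h2, ht, hdt, hd4, hd2, ha] <;> split_ifs <;> simp_all <;> tauto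
        · -- classify acc = "mixed": absorbing on both sides, whatever d's label is
          have h4p : ¬(a = [' ', ' ', ' ', ' '] ∧ ∀ x ∈ as, x = [' ', ' ', ' ', ' ']) := by
            intro hco; apply h4; simp [hco.1]; exact hco.2
          have h2p : ¬(a = [' ', ' '] ∧ ∀ x ∈ as, x = [' ', ' ']) := by
            intro hco; apply h2; simp [hco.1]; exact hco.2
          have htp : ¬(a = ['\t'] ∧ ∀ x ∈ as, x = ['\t']) := by
            intro hco; apply ht; simp [hco.1]; exact hco.2
          have hL : pvClassify ((a :: as) ++ [d]) = "mixed" := by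
            simp [pvClassify, List.all_append]
            split_ifs <;> first | rfl | tauto
          have hR : pvClassify (a :: as) = "mixed" := by
            simp [pvClassify]
            split_ifs <;> first | rfl | tauto
          rw [hL, hR]
          unfold pvJoin
          split_ifs <;> simp_all

-- the one-step commutation: appending one indent and reclassifying = joining the line's label
lemma pvStep (acc : List (List Char)) (line : List Char) :
    pvClassify (pvAppendIf acc line) = pvG (pvClassify acc) line := by
  by_cases hc : pvCond line
  · simp only [pvAppendIf, pvG, hc, if_pos]
    exact pvStep_indent acc (pvIndent line)
  · simp [pvAppendIf, pvG, hc]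

lemma pvFoldl_classify :
    ∀ (l : List (List Char)) (acc : List (List Char)),
      l.foldl pvG (pvClassify acc) = pvClassify (l.foldl pvAppendIf acc) := by
  intro l
  induction l with
  | nil => intro acc; rfl
  | cons x t ih =>
    intro acc
    simp only [List.foldl_cons, ← pvStep, ih]

-- ===== VERDICT (by name: the statement is the Claim_ definition above) =====
theorem get_indentation_style_py_spec : Claim_equal_get_indentation_style_py := by
  intro code _
  unfold Spec_get_indentation_style_py get_indentation_style_py get_indentation_style_py_alt
  rw [pvFoldl_skip_filter, pvStep_eq]
  rw [show ((PySem.Chars.splitOn code.toList ['\n']).filter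
        (fun line => !(PySem.Chars.strip line).isEmpty)) = pvLines code from rfl]
  rw [pvFoldl_pair]
  cases hl : pvLines code with
  | nil => simp
  | cons x t =>
    simp only [List.isEmpty_cons, if_false, Bool.false_eq_true, ite_true]
    have hA : (x :: t).foldl
        (fun acc line =>
          if PySem.Chars.startswith line [' '] || PySem.Chars.startswith line ['\t'] then
            acc ++ [pvIndent line]
          else acc) ([] : List (List Char))
        = (x :: t).foldl pvAppendIf [] := by
      apply PySem.List.foldl_congr_mem
      intro acc y _
      simp [pvAppendIf, pvCond]
    have hB : (x :: t).foldl pvG "none" = pvClassify ((x :: t).foldl pvAppendIf []) := by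
      have := pvFoldl_classify (x :: t) []
      simpa [pvClassify] using this
    rw [hA, hB]
    rfl
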